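-- pv_equiv track=rewrite | github.com/alex-vinny/projeto_integrador_4 | Integracao_Dados.py | month_year_iter
-- ===== SOURCE A (Python) =====
-- def month_year_iter(start_month, start_year, end_month, end_year ):
--     ym_start= 12*start_year + start_month - 1
--     ym_end= 12*end_year + end_month - 1
--     for ym in range( ym_start, ym_end ):
--         y, m = divmod( ym, 12 )
--         if m+1==1:
--             yield y, m+1
--         else:
--             continue
-- ===== SOURCE B (Python) =====
-- def month_year_iter(start_month, start_year, end_month, end_year):
--     # Closed form over YEARS: the emitted pairs are exactly (y, 1) for every
--     # year y whose January index 12*y lies in [ym_start, ym_end).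
--     first_year = -(-(12 * start_year + start_month - 1) // 12)
--     stop_year = -(-(12 * end_year + end_month - 1) // 12)
--     return ((y, 1) for y in range(first_year, stop_year))
-- ===== Notes on version B (the rewrite author's own statement) =====
-- stated objective: faster
-- what changed: B derives a closed-form year interval [ceil(ym_start/12), ceil(ym_end/12)) by ceiling division and emits (y, 1) for each year in it, instead of scanning every month index and filtering with divmod.
import Mathlib
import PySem

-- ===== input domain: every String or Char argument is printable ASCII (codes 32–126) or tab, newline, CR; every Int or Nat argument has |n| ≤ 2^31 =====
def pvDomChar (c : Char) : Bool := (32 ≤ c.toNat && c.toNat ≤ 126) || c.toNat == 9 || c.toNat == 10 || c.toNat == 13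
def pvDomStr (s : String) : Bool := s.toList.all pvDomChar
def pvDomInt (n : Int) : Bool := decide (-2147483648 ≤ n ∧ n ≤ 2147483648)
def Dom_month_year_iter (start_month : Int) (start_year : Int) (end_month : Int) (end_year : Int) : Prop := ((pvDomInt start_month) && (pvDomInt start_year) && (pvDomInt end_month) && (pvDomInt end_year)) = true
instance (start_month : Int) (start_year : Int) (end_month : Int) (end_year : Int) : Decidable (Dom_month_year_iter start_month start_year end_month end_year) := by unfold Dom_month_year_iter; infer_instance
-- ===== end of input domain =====

-- B replaces A's scan-every-month-index-and-filter loop by a closed-form YEAR interval: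
-- it computes, by ceiling division, the years whose January index lies in the range and
-- emits (y, 1) for each of them (objective: avoid the per-month scan).

-- ===== PORT A =====
def month_year_iter (start_month : Int) (start_year : Int) (end_month : Int) (end_year : Int) : List (Int × Int) :=
  let ym_start := 12 * start_year + start_month - 1
  let ym_end := 12 * end_year + end_month - 1
  (PySem.List.pyRange ym_start ym_end 1).foldl
    (fun acc ym =>
      if PySem.Int.mod ym 12 + 1 == 1 then
        acc ++ [(PySem.Int.floordiv ym 12, PySem.Int.mod ym 12 + 1)]
      else acc) []

-- ===== PORT B =====
def month_year_iter_alt (start_month : Int) (start_year : Int) (end_month : Int) (end_year : Int) : List (Int × Int) :=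
  let first_year := -(PySem.Int.floordiv (-(12 * start_year + start_month - 1)) 12)
  let stop_year := -(PySem.Int.floordiv (-(12 * end_year + end_month - 1)) 12)
  (PySem.List.pyRange first_year stop_year 1).map (fun y => (y, 1))

-- ===== PRECONDITION & SPEC =====
def Spec_month_year_iter (start_month : Int) (start_year : Int) (end_month : Int) (end_year : Int) (out : List (Int × Int)) : Prop := out = month_year_iter_alt start_month start_year end_month end_year
instance (start_month : Int) (start_year : Int) (end_month : Int) (end_year : Int) (out : List (Int × Int)) : Decidable (Spec_month_year_iter start_month start_year end_month end_year out) := by unfold Spec_month_year_iter; infer_instance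

-- ===== CLAIM (what is proved, stated in full; the proofs are below) =====
def Claim_equal_month_year_iter : Prop := ∀ (start_month : Int) (start_year : Int) (end_month : Int) (end_year : Int), Dom_month_year_iter start_month start_year end_month end_year → Spec_month_year_iter start_month start_year end_month end_year (month_year_iter start_month start_year end_month end_year)

-- ===== LEMMAS AND PROOFS =====

-- the ceiling expression −((−a)//12)·12 is the unique multiple of 12 in [a, a+12)
theorem ceil12_spec (a : Int) :
    a ≤ -(PySem.Int.floordiv (-a) 12) * 12 ∧ (-(PySem.Int.floordiv (-a) 12) - 1) * 12 < a := by
  have h := (PySem.Int.neg_floordiv_neg_eq_iff_of_pos (a := a)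
      (q := -(PySem.Int.floordiv (-a) 12)) (by norm_num)).mp rfl
  exact ⟨h.2, h.1⟩

theorem ceil12_eq (a q : Int) (h1 : a ≤ q * 12) (h2 : (q - 1) * 12 < a) :
    -(PySem.Int.floordiv (-a) 12) = q :=
  (PySem.Int.neg_floordiv_neg_eq_iff_of_pos (by norm_num)).mpr ⟨h2, h1⟩

-- cons form of a positive-step-12 range
theorem pyRange12_cons (a b : Int) (h : a < b) :
    PySem.List.pyRange a b 12 = a :: PySem.List.pyRange (a + 12) b 12 := by
  rw [PySem.List.pyRange_of_pos a b (by norm_num),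
      PySem.List.pyRange_of_pos (a + 12) b (by norm_num)]
  have hn : ((b - a + 12 - 1) / 12).toNat =
      (if a + 12 < b then ((b - (a + 12) + 12 - 1) / 12).toNat else 0) + 1 := by
    split_ifs with h2 <;> omega
  rw [if_pos h, hn, List.range_succ_eq_map]
  simp [List.map_map, Function.comp_def]
  intro k _
  ring

theorem pyRange12_nil (a b : Int) (h : b ≤ a) : PySem.List.pyRange a b 12 = [] := by
  rw [PySem.List.pyRange_of_pos a b (by norm_num), if_neg (by omega)]
  simp

-- core 1: filtering the 1-step range down to multiples of 12 equals the 12-step range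
-- started at the first multiple of 12 ≥ a
theorem filter_range_eq (a b : Int) :
    (PySem.List.pyRange a b 1).filter (fun x => PySem.Int.mod x 12 + 1 == 1) =
      PySem.List.pyRange (-(PySem.Int.floordiv (-a) 12) * 12) b 12 := by
  by_cases hab : a < b
  · have hterm : (b - (a + 1)).toNat < (b - a).toNat := by omega
    rw [PySem.List.pyRange_one_cons hab, List.filter_cons]
    have hmod : PySem.Int.mod a 12 = a % 12 := PySem.Int.mod_eq_emod_of_pos (by norm_num)
    by_cases hdvd : (12 : Int) ∣ a
    · have hpa : (PySem.Int.mod a 12 + 1 == 1) = true := by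
        rw [hmod]; simp; omega
      have hc : -(PySem.Int.floordiv (-a) 12) = a / 12 := by
        apply ceil12_eq
        · omega
        · omega
      have hc' : -(PySem.Int.floordiv (-(a+1)) 12) = a / 12 + 1 := by
        apply ceil12_eq
        · omega
        · omega
      have h1 : a / 12 * 12 = a := by omega
      have h2 : (a / 12 + 1) * 12 = a + 12 := by omega
      rw [hpa, if_pos rfl, filter_range_eq (a + 1) b, hc, hc', h1, h2,
          pyRange12_cons a b hab]
    · have hpa : (PySem.Int.mod a 12 + 1 == 1) = false := by
        rw [hmod]; simp; omega
      have hca := ceil12_spec a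
      have hc : -(PySem.Int.floordiv (-(a+1)) 12) = -(PySem.Int.floordiv (-a) 12) := by
        apply ceil12_eq
        · omega
        · have hne : a ≠ -(PySem.Int.floordiv (-a) 12) * 12 := by
            intro he
            exact hdvd ⟨-(PySem.Int.floordiv (-a) 12), by omega⟩
          omega
      rw [hpa, if_neg (by simp), filter_range_eq (a + 1) b, hc]
  · have hca := ceil12_spec a
    rw [PySem.List.pyRange_one_eq_nil (by omega), pyRange12_nil _ b (by omega)]
    simp
termination_by (b - a).toNat

-- core 2: dividing the 12-step range of January indices by 12 gives the 1-step
-- range of years ending at the ceiling of b/12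
theorem map_div_range12 (q b : Int) :
    (PySem.List.pyRange (q * 12) b 12).map
        (fun ym => ((PySem.Int.floordiv ym 12 : Int), (1 : Int))) =
      (PySem.List.pyRange q (-(PySem.Int.floordiv (-b) 12)) 1).map (fun y => (y, 1)) := by
  have hcb := ceil12_spec b
  by_cases h : q * 12 < b
  · have hterm : (b - ((q + 1) * 12)).toNat < (b - q * 12).toNat := by omega
    have hq : PySem.Int.floordiv (q * 12) 12 = q := by
      rw [PySem.Int.floordiv_eq_ediv_of_pos (by norm_num)]; omega
    have h12 : q * 12 + 12 = (q + 1) * 12 := by ring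
    have hqc : q < -(PySem.Int.floordiv (-b) 12) := by omega
    rw [pyRange12_cons _ _ h, List.map_cons, hq, h12,
        PySem.List.pyRange_one_cons hqc, List.map_cons, map_div_range12 (q + 1) b]
  · rw [pyRange12_nil _ _ (by omega), PySem.List.pyRange_one_eq_nil (by omega)]
    simp
termination_by (b - q * 12).toNat

-- ===== VERDICT (by name: the statement is the Claim_ definition above) =====
theorem month_year_iter_spec : Claim_equal_month_year_iter := by
  intro sm sy em ey _
  show _ = _
  unfold month_year_iter month_year_iter_alt
  rw [PySem.List.foldl_append_if (fun x => PySem.Int.mod x 12 + 1 == 1)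
      (fun x => (PySem.Int.floordiv x 12, PySem.Int.mod x 12 + 1)), List.nil_append]
  have hmap : ((PySem.List.pyRange (12 * sy + sm - 1) (12 * ey + em - 1) 1).filter
        (fun x => PySem.Int.mod x 12 + 1 == 1)).map
        (fun x => (PySem.Int.floordiv x 12, PySem.Int.mod x 12 + 1)) =
      ((PySem.List.pyRange (12 * sy + sm - 1) (12 * ey + em - 1) 1).filter
        (fun x => PySem.Int.mod x 12 + 1 == 1)).map
        (fun x => ((PySem.Int.floordiv x 12 : Int), (1 : Int))) := by
    apply List.map_congr_left
    intro x hx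
    have hx' := List.of_mem_filter hx
    have hmod : PySem.Int.mod x 12 = x % 12 := PySem.Int.mod_eq_emod_of_pos (by norm_num)
    rw [hmod] at hx'
    simp only [beq_iff_eq] at hx'
    rw [hmod, hx']
  rw [hmap, filter_range_eq, map_div_range12]
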